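-- pv_equiv track=rewrite | github.com/goncalossantos/CtCI | chapter_17/letters_and_numbers.py | letters_numbers_brute_force
-- ===== SOURCE A (Python) =====
-- def letters_numbers_brute_force(array: str) -> int:
--     max_len = 0
--     for i in range(len(array)):
--         count_digit = 0
--         count_char = 0
--         for j in range(i):
--             if array[j].isdigit():
--                 count_digit += 1
--             else:
--                 count_char += 1
--         if count_char == count_digit:
--             max_len = max(max_len, count_char + count_char)
--         for j in range(i, len(array)):
--             if array[j].isdigit():
--                 count_digit += 1
--             else:
--                 count_char += 1
--             if array[j - i].isdigit():
--                 count_digit -= 1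
--             else:
--                 count_char -= 1
--             if count_char == count_digit:
--                 max_len = max(max_len, count_char + count_char)
--     return max_len
-- ===== SOURCE B (Python) =====
-- def letters_numbers_brute_force(array: str) -> int:
--     # Prefix-sum (+1 for digit, -1 otherwise) with first-occurrence hashmap: O(n).
--     first_at = {0: -1}
--     running = 0
--     best = 0
--     for idx, ch in enumerate(array):
--         running += 1 if ch.isdigit() else -1
--         if running in first_at:
--             best = max(best, idx - first_at[running])
--         else:
--             first_at[running] = idx
--     return best
-- ===== Notes on version B (the rewrite author's own statement) =====
-- stated objective: faster
-- what changed: Replaces the O(n^2) all-window sliding scan by a single O(n) pass keeping a running digit-minus-letter prefix sum and a hashmap of each sum's first occurrence.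
-- intended difference: On nonempty strings whose digit count equals their non-digit count, A's outer loop only tries window lengths 0..n-1 so it returns the longest PROPER balanced substring length, while B returns the full length n, the intended answer (e.g. 'a1': A=0, B=2). — e.g. on letters_numbers_brute_force("a1"): A returns 0, B returns 2
import Mathlib
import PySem

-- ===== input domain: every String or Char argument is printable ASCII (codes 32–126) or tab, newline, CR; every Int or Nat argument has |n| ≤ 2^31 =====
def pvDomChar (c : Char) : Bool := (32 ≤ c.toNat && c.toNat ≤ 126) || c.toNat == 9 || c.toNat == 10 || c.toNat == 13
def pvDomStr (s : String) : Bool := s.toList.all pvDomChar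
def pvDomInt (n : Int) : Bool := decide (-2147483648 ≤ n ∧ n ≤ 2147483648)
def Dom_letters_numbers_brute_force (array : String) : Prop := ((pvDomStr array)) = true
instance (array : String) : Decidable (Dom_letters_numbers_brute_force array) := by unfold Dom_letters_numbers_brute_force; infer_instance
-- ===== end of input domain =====

-- B replaces A's O(n^2) all-window sliding scan with a single prefix-sum pass over the string
-- keeping a hashmap of each running sum's first occurrence; on whole-balanced strings B returns
-- the full length, which A's outer loop never tries (stated as the intended difference D_ below).

-- ===== PORT A =====
-- Loop indices are Nat (Python's range yields 0,1,2,…); array[j] is in range everywhere A reads it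
-- (j < len(array), and j - i with j ≥ i), so List.getD with an arbitrary default is exact;
-- Python's str.isdigit on a single printable-ASCII character is Char.isDigit.
def letters_numbers_brute_force (array : String) : Int :=
  let cs := array.toList
  let n := cs.length
  (List.range n).foldl (fun max_len i =>
    let counts : Int × Int := (List.range i).foldl
      (fun (counts : Int × Int) j =>
        if (cs.getD j ' ').isDigit then (counts.1 + 1, counts.2) else (counts.1, counts.2 + 1))
      (0, 0)
    let max_len := if counts.2 == counts.1 then max max_len (counts.2 + counts.2) else max_len
    ((List.range' i (n - i)).foldl
      (fun (st : Int × Int × Int) j =>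
        let cd := if (cs.getD j ' ').isDigit then st.2.1 + 1 else st.2.1
        let cc := if (cs.getD j ' ').isDigit then st.2.2 else st.2.2 + 1
        let cd := if (cs.getD (j - i) ' ').isDigit then cd - 1 else cd
        let cc := if (cs.getD (j - i) ' ').isDigit then cc else cc - 1
        if cc == cd then (max st.1 (cc + cc), cd, cc) else (st.1, cd, cc))
      (max_len, counts)).1) 0

-- ===== PORT B =====
-- transliteration of Source B: enumerate → PySem.List.enumerate, dict → PySem.Dict Int Int.
def letters_numbers_brute_force_alt (array : String) : Int :=
  let st := (PySem.List.enumerate array.toList 0).foldl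
    (fun (st : PySem.Dict Int Int × Int × Int) p =>
      let first_at := st.1
      let running := if p.2.isDigit then st.2.1 + 1 else st.2.1 - 1
      if first_at.contains running then
        (first_at, running, max st.2.2 (p.1 - first_at.getD running 0))
      else
        (first_at.insert running p.1, running, st.2.2))
    ((PySem.Dict.empty).insert 0 (-1), 0, 0)
  st.2.2

-- ===== PRECONDITION & SPEC =====
-- On nonempty strings whose digit count equals their non-digit count, A's outer loop only tries
-- window lengths 0..n-1, so A returns the longest PROPER balanced substring length, while B returns
-- the full length n, the intended answer (e.g. "a1": A = 0, B = 2).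
def D_letters_numbers_brute_force (array : String) : Prop :=
  array.toList ≠ [] ∧ 2 * array.toList.countP (fun c => c.isDigit) = array.toList.length
instance (array : String) : Decidable (D_letters_numbers_brute_force array) := by
  unfold D_letters_numbers_brute_force; infer_instance

def Spec_letters_numbers_brute_force (array : String) (out : Int) : Prop :=
  ¬ D_letters_numbers_brute_force array → out = letters_numbers_brute_force_alt array
instance (array : String) (out : Int) : Decidable (Spec_letters_numbers_brute_force array out) := by
  unfold Spec_letters_numbers_brute_force; infer_instance

def pvDiffWitness_letters_numbers_brute_force : String := "a1"
def pvDiffWitnessOut_letters_numbers_brute_force : Int × Int := (0, 2)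

-- ===== CLAIM (what is proved, stated in full; the proofs are below) =====
def Claim_unchanged_letters_numbers_brute_force : Prop := ∀ (array : String), Dom_letters_numbers_brute_force array → Spec_letters_numbers_brute_force array (letters_numbers_brute_force array)
def Claim_changed_letters_numbers_brute_force : Prop := Dom_letters_numbers_brute_force (pvDiffWitness_letters_numbers_brute_force) ∧ D_letters_numbers_brute_force (pvDiffWitness_letters_numbers_brute_force) ∧ letters_numbers_brute_force (pvDiffWitness_letters_numbers_brute_force) = pvDiffWitnessOut_letters_numbers_brute_force.1 ∧ letters_numbers_brute_force_alt (pvDiffWitness_letters_numbers_brute_force) = pvDiffWitnessOut_letters_numbers_brute_force.2 ∧ pvDiffWitnessOut_letters_numbers_brute_force.1 ≠ pvDiffWitnessOut_letters_numbers_brute_force.2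
def Claim_exact_letters_numbers_brute_force : Prop := ∀ (array : String), Dom_letters_numbers_brute_force array → D_letters_numbers_brute_force array → letters_numbers_brute_force array ≠ letters_numbers_brute_force_alt array

-- ===== LEMMAS AND PROOFS =====

def pvWgt (c : Char) : Int := if c.isDigit then 1 else -1
def pvPre (cs : List Char) (k : Nat) : Int := ((cs.take k).map pvWgt).sum

theorem pvPre_succ (cs : List Char) (k : Nat) (h : k < cs.length) :
    pvPre cs (k + 1) = pvPre cs k + pvWgt (cs.getD k ' ') := by
  have h' : k < (cs.map pvWgt).length := by simpa using h
  unfold pvPre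
  rw [List.map_take, List.map_take, List.take_add_one, List.getElem?_eq_getElem h']
  simp [List.getElem?_eq_getElem h, List.getElem_map]

theorem pvPre_full_iff (cs : List Char) :
    pvPre cs cs.length = 0 ↔ 2 * cs.countP (fun c => c.isDigit) = cs.length := by
  have h : ∀ l : List Char, pvPre l l.length = 2 * (l.countP (fun c => c.isDigit) : Int) - l.length := by
    intro l
    induction l with
    | nil => simp [pvPre]
    | cons x xs ih =>
      simp [pvPre, List.countP_cons, pvWgt] at *
      by_cases hx : x.isDigit <;> simp [hx] <;> push_cast <;> omega
  rw [h]; omega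

theorem pvCondmax_spec (l : List Nat) (p : Nat → Bool) (v : Nat → Int) (m : Int) :
    (l.foldl (fun m a => if p a then max m (v a) else m) m = m ∨
      ∃ a ∈ l, p a = true ∧ l.foldl (fun m a => if p a then max m (v a) else m) m = v a) ∧
    m ≤ l.foldl (fun m a => if p a then max m (v a) else m) m ∧
    ∀ a ∈ l, p a = true → v a ≤ l.foldl (fun m a => if p a then max m (v a) else m) m := by
  induction l generalizing m with
  | nil => simp
  | cons x xs ih =>
    simp only [List.foldl_cons]
    by_cases hx : p x
    · simp only [hx, if_true]
      obtain ⟨hmem, hle, hub⟩ := ih (max m (v x))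
      refine ⟨?_, le_trans (le_max_left _ _) hle, ?_⟩
      · rcases hmem with h | ⟨a, ha, hpa, heq⟩
        · rcases max_choice m (v x) with hc | hc
          · left; rw [h, hc]
          · right; exact ⟨x, by simp, hx, by rw [h, hc]⟩
        · right; exact ⟨a, by simp [ha], hpa, heq⟩
      · intro a ha hpa
        rcases List.mem_cons.1 ha with rfl | ha'
        · exact le_trans (le_max_right _ _) hle
        · exact hub a ha' hpa
    · simp only [hx, if_false]
      obtain ⟨hmem, hle, hub⟩ := ih m
      refine ⟨?_, hle, ?_⟩
      · rcases hmem with h | ⟨a, ha, hpa, heq⟩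
        · left; exact h
        · right; exact ⟨a, by simp [ha], hpa, heq⟩
      · intro a ha hpa
        rcases List.mem_cons.1 ha with rfl | ha'
        · exact absurd hpa (by simp [hx])
        · exact hub a ha' hpa

theorem pvCondmax_const (l : List Nat) (p : Nat → Bool) (c m : Int) :
    l.foldl (fun m a => if p a then max m c else m) m = if l.any p then max m c else m := by
  induction l generalizing m with
  | nil => simp
  | cons x xs ih =>
    simp only [List.foldl_cons, List.any_cons]
    by_cases hx : p x
    · simp only [hx, if_true, ih, Bool.true_or]
      by_cases hxs : xs.any p <;> simp [hxs, max_assoc]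
    · simp [hx, ih]

theorem pvMaxProj_mem (l : List Nat) (f : Nat → Int) (m : Int) :
    l.foldl (fun m b => max m (f b)) m = m ∨ ∃ b ∈ l, l.foldl (fun m b => max m (f b)) m = f b := by
  induction l generalizing m with
  | nil => simp
  | cons x xs ih =>
    simp only [List.foldl_cons]
    rcases ih (max m (f x)) with h | ⟨b, hb, heq⟩
    · rcases max_choice m (f x) with hc | hc
      · left; rw [h, hc]
      · right; exact ⟨x, by simp, by rw [h, hc]⟩
    · right; exact ⟨b, by simp [hb], heq⟩

def pvBalAt (cs : List Char) (a i : Nat) : Bool := pvPre cs (a + i) == pvPre cs a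


-- named copies of A's loop bodies (definitionally equal to the port's lambdas)
def pvAStep (cs : List Char) (i : Nat) (st : Int × Int × Int) (j : Nat) : Int × Int × Int :=
  let cd := if (cs.getD j ' ').isDigit then st.2.1 + 1 else st.2.1
  let cc := if (cs.getD j ' ').isDigit then st.2.2 else st.2.2 + 1
  let cd := if (cs.getD (j - i) ' ').isDigit then cd - 1 else cd
  let cc := if (cs.getD (j - i) ' ').isDigit then cc else cc - 1
  if cc == cd then (max st.1 (cc + cc), cd, cc) else (st.1, cd, cc)

def pvPStep (cs : List Char) (counts : Int × Int) (j : Nat) : Int × Int :=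
  if (cs.getD j ' ').isDigit then (counts.1 + 1, counts.2) else (counts.1, counts.2 + 1)

def pvGStep (cs : List Char) (i : Nat) (m : Int) (a : Nat) : Int :=
  if pvBalAt cs a i then max m (i : Int) else m

theorem pvAstep_eq (cs : List Char) (i s : Nat) (m d c : Int)
    (hsi : s + i < cs.length) (hs : s < cs.length)
    (hdc : d - c = pvPre cs (s + i) - pvPre cs s) (hsum : d + c = (i : Int)) :
    ∃ d2 c2 : Int,
      pvAStep cs i (m, d, c) (i + s)
      = ((if pvBalAt cs (s + 1) i then max m (i : Int) else m), d2, c2)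
      ∧ d2 - c2 = pvPre cs (s + 1 + i) - pvPre cs (s + 1) ∧ d2 + c2 = (i : Int) := by
  have hp1 : pvPre cs (s + i + 1) = pvPre cs (s + i) + pvWgt (cs.getD (s + i) ' ') :=
    pvPre_succ cs (s + i) hsi
  have hp2 : pvPre cs (s + 1) = pvPre cs s + pvWgt (cs.getD s ' ') := pvPre_succ cs s hs
  have hq : pvPre cs (s + 1 + i) = pvPre cs (s + i + 1) := by ring_nf
  unfold pvAStep
  dsimp only
  rw [show i + s - i = s by omega, show i + s = s + i by omega]
  have key : ∀ d2 c2 : Int, d2 - c2 = pvPre cs (s + 1 + i) - pvPre cs (s + 1) → d2 + c2 = (i : Int) →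
      (if c2 == d2 then (max m (c2 + c2), d2, c2) else (m, d2, c2))
        = ((if pvBalAt cs (s + 1) i then max m (i : Int) else m), d2, c2) := by
    intro d2 c2 hd hs2
    simp only [pvBalAt]
    by_cases hx : c2 = d2
    · rw [if_pos (beq_iff_eq.mpr hx),
        if_pos (beq_iff_eq.mpr (show pvPre cs (s + 1 + i) = pvPre cs (s + 1) by omega)),
        show c2 + c2 = (i : Int) by omega]
    · rw [if_neg (show ¬((c2 == d2) = true) by simp [hx]),
        if_neg (show ¬((pvPre cs (s + 1 + i) == pvPre cs (s + 1)) = true) by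
          simp only [beq_iff_eq]; omega)]
  by_cases h1 : (cs.getD (s + i) ' ').isDigit <;>
    by_cases h2 : (cs.getD s ' ').isDigit <;>
    simp only [pvWgt, h1, h2, if_true, Bool.false_eq_true, if_false] at hp1 hp2 ⊢
  · exact ⟨d + 1 - 1, c, key _ _ (by omega) (by omega), by omega, by omega⟩
  · exact ⟨d + 1, c - 1, key _ _ (by omega) (by omega), by omega, by omega⟩
  · exact ⟨d - 1, c + 1, key _ _ (by omega) (by omega), by omega, by omega⟩
  · exact ⟨d, c + 1 - 1, key _ _ (by omega) (by omega), by omega, by omega⟩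

theorem pvSlide_inv (cs : List Char) (i : Nat) :
    ∀ (t s : Nat) (m d c : Int),
    s + t + i ≤ cs.length →
    d - c = pvPre cs (s + i) - pvPre cs s →
    d + c = (i : Int) →
    ((List.range' (i + s) t).foldl (pvAStep cs i) (m, d, c)).1
    = (List.range' (s + 1) t).foldl (pvGStep cs i) m := by
  intro t
  induction t with
  | zero => intro s m d c _ _ _; simp
  | succ t ih =>
    intro s m d c hlen hdc hsum
    rw [List.range'_succ, List.range'_succ, List.foldl_cons, List.foldl_cons]
    obtain ⟨d2, c2, hstep, hd2, hs2⟩ :=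
      pvAstep_eq cs i s m d c (by omega) (by omega) hdc hsum
    rw [hstep, show i + s + 1 = i + (s + 1) by omega,
      show pvGStep cs i m (s + 1) = (if pvBalAt cs (s + 1) i then max m (i : Int) else m) from rfl]
    exact ih (s + 1) _ d2 c2 (by omega) (by omega) hs2

theorem pvPrefix_eq (cs : List Char) (i : Nat) (h : i ≤ cs.length) :
    ((List.range i).foldl (pvPStep cs) (0, 0)).1 - ((List.range i).foldl (pvPStep cs) (0, 0)).2
      = pvPre cs i
    ∧ ((List.range i).foldl (pvPStep cs) (0, 0)).1 + ((List.range i).foldl (pvPStep cs) (0, 0)).2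
      = (i : Int) := by
  induction i with
  | zero => simp [pvPre]
  | succ i ih =>
    obtain ⟨ih1, ih2⟩ := ih (by omega)
    rw [List.range_succ, List.foldl_append, List.foldl_cons, List.foldl_nil]
    have hp : pvPre cs (i + 1) = pvPre cs i + pvWgt (cs.getD i ' ') := pvPre_succ cs i (by omega)
    rw [show ∀ p : Int × Int, pvPStep cs p i =
        if (cs.getD i ' ').isDigit then (p.1 + 1, p.2) else (p.1, p.2 + 1) from fun p => rfl]
    by_cases h1 : (cs.getD i ' ').isDigit <;>
      simp only [pvWgt, h1, if_true, Bool.false_eq_true, if_false] at hp ⊢ <;>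
      exact ⟨by omega, by omega⟩

def pvHasB (cs : List Char) (i : Nat) : Bool :=
  (List.range (cs.length + 1 - i)).any (fun a => pvBalAt cs a i)

def pvRefA (cs : List Char) : Int :=
  (List.range cs.length).foldl (fun (m : Int) (i : Nat) => if pvHasB cs i then max m (i : Int) else m) 0

def pvOuter (cs : List Char) (max_len : Int) (i : Nat) : Int :=
  let counts := (List.range i).foldl (pvPStep cs) (0, 0)
  let max_len := if counts.2 == counts.1 then max max_len (counts.2 + counts.2) else max_len
  ((List.range' i (cs.length - i)).foldl (pvAStep cs i) (max_len, counts)).1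

theorem pvPortA_named (array : String) :
    letters_numbers_brute_force array = (List.range array.toList.length).foldl (pvOuter array.toList) 0 := rfl

theorem pvOuter_eq (cs : List Char) (i : Nat) (hi : i < cs.length) (m : Int) :
    pvOuter cs m i = if pvHasB cs i then max m (i : Int) else m := by
  obtain ⟨hd, hs⟩ := pvPrefix_eq cs i (le_of_lt hi)
  unfold pvOuter
  set counts := (List.range i).foldl (pvPStep cs) (0, 0) with hc
  have hinit : (if counts.2 == counts.1 then max m (counts.2 + counts.2) else m)
      = pvGStep cs i m 0 := by
    unfold pvGStep
    simp only [pvBalAt, Nat.zero_add, show pvPre cs 0 = 0 from rfl]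
    by_cases hx : counts.2 = counts.1
    · rw [if_pos (beq_iff_eq.mpr hx),
        if_pos (beq_iff_eq.mpr (show pvPre cs i = 0 by omega)),
        show counts.2 + counts.2 = (i : Int) by omega]
    · rw [if_neg (show ¬((counts.2 == counts.1) = true) by simp [hx]),
        if_neg (show ¬((pvPre cs i == 0) = true) by simp only [beq_iff_eq]; omega)]
  dsimp only
  rw [hinit]
  have hslide := pvSlide_inv cs i (cs.length - i) 0 (pvGStep cs i m 0) counts.1 counts.2
    (by omega) (by simp only [Nat.zero_add, show pvPre cs 0 = 0 from rfl]; omega) hs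
  rw [show i + 0 = i from rfl] at hslide
  rw [show (counts.1, counts.2) = counts from rfl] at hslide
  rw [hslide]
  rw [show (List.range' 1 (cs.length - i)).foldl (pvGStep cs i) (pvGStep cs i m 0)
      = (List.range' 0 (cs.length - i + 1)).foldl (pvGStep cs i) m by
    rw [List.range'_succ, List.foldl_cons]]
  rw [show List.range' 0 (cs.length - i + 1) = List.range (cs.length - i + 1) from
    (List.range_eq_range').symm]
  rw [show cs.length - i + 1 = cs.length + 1 - i by omega]
  rw [show (List.range (cs.length + 1 - i)).foldl (pvGStep cs i) m
      = (List.range (cs.length + 1 - i)).foldl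
          (fun (m : Int) (a : Nat) => if pvBalAt cs a i then max m (i : Int) else m) m from rfl]
  rw [pvCondmax_const (List.range (cs.length + 1 - i)) (fun a => pvBalAt cs a i) (i : Int) m]
  rfl

theorem pvPortA_eq (array : String) : letters_numbers_brute_force array = pvRefA array.toList := by
  rw [pvPortA_named, pvRefA]
  exact PySem.List.foldl_congr_mem _ _ _ _
    (fun m i hi => pvOuter_eq _ i (List.mem_range.mp hi) m)

def pvMinA (cs : List Char) (b : Nat) : Nat :=
  ((List.range (b + 1)).find? (fun t => pvPre cs t == pvPre cs b)).getD b

def pvBfold (cs : List Char) (k : Nat) : Int :=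
  (List.range' 1 k).foldl (fun (m : Int) (b : Nat) => max m ((b : Int) - (pvMinA cs b : Int))) 0

def pvBStep (st : PySem.Dict Int Int × Int × Int) (p : Int × Char) :
    PySem.Dict Int Int × Int × Int :=
  let first_at := st.1
  let running := if p.2.isDigit then st.2.1 + 1 else st.2.1 - 1
  if first_at.contains running then
    (first_at, running, max st.2.2 (p.1 - first_at.getD running 0))
  else
    (first_at.insert running p.1, running, st.2.2)

theorem pvPortB_named (array : String) :
    letters_numbers_brute_force_alt array
      = ((PySem.List.enumerate array.toList 0).foldl pvBStep
          ((PySem.Dict.empty).insert 0 (-1), 0, 0)).2.2 := rfl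

theorem pvBfold_nonneg (cs : List Char) (k : Nat) : 0 ≤ pvBfold cs k :=
  (PySem.List.le_foldl_max_int (List.range' 1 k)
    (fun b => (b : Int) - (pvMinA cs b : Int)) 0).1

theorem pvBfold_succ (cs : List Char) (k : Nat) :
    pvBfold cs (k + 1) = max (pvBfold cs k) (((k : Int) + 1) - (pvMinA cs (k + 1) : Int)) := by
  unfold pvBfold
  rw [List.range'_concat, List.foldl_append, List.foldl_cons, List.foldl_nil]
  norm_num
  ring_nf

theorem pvFind_succ (cs : List Char) (k : Nat) (v : Int) :
    (List.range (k + 2)).find? (fun t => pvPre cs t == v)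
      = ((List.range (k + 1)).find? (fun t => pvPre cs t == v)).or
          (if pvPre cs (k + 1) == v then some (k + 1) else none) := by
  rw [show k + 2 = (k + 1) + 1 from rfl, List.range_succ, List.find?_append, List.find?_singleton]

theorem pvB_inv (cs : List Char) :
    ∀ (l : List Char) (k : Nat) (first : PySem.Dict Int Int) (best : Int),
    k + l.length = cs.length → l = cs.drop k →
    (∀ v : Int, first.get? v
      = ((List.range (k + 1)).find? (fun t => pvPre cs t == v)).map (fun (t : Nat) => (t : Int) - 1)) →
    best = pvBfold cs k →
    ((PySem.List.enumerate l (k : Int)).foldl pvBStep (first, pvPre cs k, best)).2.2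
      = pvBfold cs cs.length := by
  intro l
  induction l with
  | nil =>
    intro k first best hk _ _ hbest
    simp only [List.length_nil, Nat.add_zero] at hk
    subst hk
    simpa [PySem.List.enumerate] using hbest
  | cons x l' ih =>
    intro k first best hk hdrop hInv hbest
    have hkn : k < cs.length := by simp at hk; omega
    have hx : x = cs[k] ∧ l' = cs.drop (k + 1) := by
      rw [List.drop_eq_getElem_cons hkn] at hdrop
      exact ⟨(List.cons.injEq _ _ _ _).mp hdrop |>.1, (List.cons.injEq _ _ _ _).mp hdrop |>.2⟩
    have hrun : (if x.isDigit then pvPre cs k + 1 else pvPre cs k - 1) = pvPre cs (k + 1) := by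
      rw [pvPre_succ cs k hkn, List.getD_eq_getElem cs ' ' hkn, ← hx.1, pvWgt]
      by_cases hxd : x.isDigit <;> simp [hxd] <;> ring
    rw [PySem.List.enumerate_cons, List.foldl_cons]
    have hstepdef : pvBStep (first, pvPre cs k, best) ((k : Int), x)
        = (if first.contains (pvPre cs (k + 1)) then
            (first, pvPre cs (k + 1), max best ((k : Int) - first.getD (pvPre cs (k + 1)) 0))
          else
            (first.insert (pvPre cs (k + 1)) (k : Int), pvPre cs (k + 1), best)) := by
      unfold pvBStep
      dsimp only
      rw [hrun]
    rw [hstepdef]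
    cases hc : first.contains (pvPre cs (k + 1)) with
    | true =>
      rw [if_pos rfl]
      have hc' := hc
      rw [PySem.Dict.contains_eq_isSome_get?, hInv (pvPre cs (k + 1)), Option.isSome_map] at hc'
      obtain ⟨t0, hfind⟩ := Option.isSome_iff_exists.mp hc'
      have hgetD : first.getD (pvPre cs (k + 1)) 0 = (t0 : Int) - 1 := by
        rw [PySem.Dict.getD_eq_get?_getD, hInv (pvPre cs (k + 1)), hfind]
        rfl
      have hminA : pvMinA cs (k + 1) = t0 := by
        unfold pvMinA
        rw [show (k + 1) + 1 = k + 2 from rfl, pvFind_succ, hfind]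
        rfl
      have hbest' : max best ((k : Int) - first.getD (pvPre cs (k + 1)) 0) = pvBfold cs (k + 1) := by
        rw [hgetD, hbest, pvBfold_succ, hminA]
        congr 1
        ring
      have hInv' : ∀ v : Int, first.get? v
          = ((List.range ((k + 1) + 1)).find? (fun t => pvPre cs t == v)).map
              (fun (t : Nat) => (t : Int) - 1) := by
        intro v
        rw [show (k + 1) + 1 = k + 2 from rfl, pvFind_succ]
        by_cases hv : pvPre cs (k + 1) = v
        · subst hv
          rw [hfind, hInv (pvPre cs (k + 1)), hfind]
          rfl
        · rw [if_neg (by simpa using hv), Option.or_none]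
          exact hInv v
      have hrec := ih (k + 1) first (pvBfold cs (k + 1)) (by simp at hk ⊢; omega) hx.2 hInv' rfl
      rw [show ((k : Int) + 1) = ((k + 1 : Nat) : Int) by push_cast; ring, hbest']
      exact hrec
    | false =>
      rw [if_neg (by simp)]
      have hc' := hc
      rw [PySem.Dict.contains_eq_isSome_get?, hInv (pvPre cs (k + 1)), Option.isSome_map] at hc'
      have hnone : ((List.range (k + 1)).find? (fun t => pvPre cs t == pvPre cs (k + 1))) = none := by
        cases h : (List.range (k + 1)).find? (fun t => pvPre cs t == pvPre cs (k + 1)) with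
        | none => rfl
        | some t => rw [h] at hc'; simp at hc'
      have hminA : pvMinA cs (k + 1) = k + 1 := by
        unfold pvMinA
        rw [show (k + 1) + 1 = k + 2 from rfl, pvFind_succ, hnone]
        simp
      have hbest' : best = pvBfold cs (k + 1) := by
        rw [hbest, pvBfold_succ, hminA]
        have := pvBfold_nonneg cs k
        rw [show (k : Int) + 1 - ((k + 1 : Nat) : Int) = 0 by push_cast; ring]
        omega
      have hInv' : ∀ v : Int, (first.insert (pvPre cs (k + 1)) (k : Int)).get? v
          = ((List.range ((k + 1) + 1)).find? (fun t => pvPre cs t == v)).map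
              (fun (t : Nat) => (t : Int) - 1) := by
        intro v
        rw [show (k + 1) + 1 = k + 2 from rfl, pvFind_succ, PySem.Dict.get?_insert]
        by_cases hv : v = pvPre cs (k + 1)
        · subst hv
          rw [if_pos rfl, hnone, if_pos (by simp)]
          simp
        · rw [if_neg hv, if_neg (by simpa using fun h => hv h.symm), Option.or_none]
          exact hInv v
      have hrec := ih (k + 1) (first.insert (pvPre cs (k + 1)) (k : Int)) best
        (by simp at hk ⊢; omega) hx.2 hInv' hbest'
      rw [show ((k : Int) + 1) = ((k + 1 : Nat) : Int) by push_cast; ring]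
      exact hrec

theorem pvPortB_eq (array : String) :
    letters_numbers_brute_force_alt array = pvBfold array.toList array.toList.length := by
  rw [pvPortB_named]
  have hpre0 : pvPre array.toList 0 = 0 := rfl
  have hInv0 : ∀ v : Int, ((PySem.Dict.empty).insert 0 (-1) : PySem.Dict Int Int).get? v
      = ((List.range (0 + 1)).find? (fun t => pvPre array.toList t == v)).map
          (fun (t : Nat) => (t : Int) - 1) := by
    intro v
    rw [PySem.Dict.get?_insert, show List.range (0 + 1) = [0] from rfl, List.find?_singleton]
    by_cases hv : v = 0
    · rw [if_pos hv, if_pos (by simp [hpre0, hv])]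
      simp
    · rw [if_neg hv, if_neg (by simp [hpre0]; exact fun h => hv h.symm), PySem.Dict.get?_empty]
      rfl
  have := pvB_inv array.toList array.toList 0 ((PySem.Dict.empty).insert 0 (-1)) 0
    (by simp) (by simp) hInv0 rfl
  rw [show ((0 : Nat) : Int) = 0 from rfl, hpre0] at this
  exact this

theorem pvMinA_le (cs : List Char) (b a : Nat) (ha : a ≤ b) (hp : pvPre cs a = pvPre cs b) :
    pvMinA cs b ≤ a ∧ pvPre cs (pvMinA cs b) = pvPre cs b := by
  unfold pvMinA
  cases hf : (List.range (b + 1)).find? (fun t => pvPre cs t == pvPre cs b) with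
  | none =>
    exfalso
    rw [List.find?_eq_none] at hf
    exact absurd (by simp [hp] : (fun t => pvPre cs t == pvPre cs b) a = true)
      (by simpa using hf a (List.mem_range.mpr (by omega)))
  | some t =>
    obtain ⟨hpt, i, hi, hgi, hmin⟩ := List.find?_eq_some_iff_getElem.mp hf
    simp only [List.getElem_range] at hgi
    subst hgi
    refine ⟨?_, by simpa using hpt⟩
    simp only [Option.getD_some]
    have hlen : (List.range (b + 1)).length = b + 1 := by simp
    by_contra hlt
    have := hmin a (by omega)
    simp [hp] at this

theorem pvB_ub (cs : List Char) (a b : Nat) (hab : a ≤ b) (hb : b ≤ cs.length)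
    (hp : pvPre cs a = pvPre cs b) :
    (b : Int) - (a : Int) ≤ pvBfold cs cs.length := by
  rcases Nat.eq_or_lt_of_le hab with rfl | hlt
  · have := pvBfold_nonneg cs cs.length
    omega
  · have hmem : b ∈ List.range' 1 cs.length := by
      rw [List.mem_range'_1]
      omega
    have hub := (PySem.List.le_foldl_max_int (List.range' 1 cs.length)
      (fun b => (b : Int) - (pvMinA cs b : Int)) 0).2 b hmem
    have hmin := pvMinA_le cs b a (by omega) hp
    unfold pvBfold
    have : (pvMinA cs b : Int) ≤ (a : Int) := by exact_mod_cast Nat.cast_le.mpr hmin.1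
    omega

theorem pvB_att (cs : List Char) :
    pvBfold cs cs.length = 0 ∨
      ∃ a b : Nat, a ≤ b ∧ b ≤ cs.length ∧ pvPre cs a = pvPre cs b ∧
        pvBfold cs cs.length = (b : Int) - (a : Int) := by
  rcases pvMaxProj_mem (List.range' 1 cs.length)
      (fun b => (b : Int) - (pvMinA cs b : Int)) 0 with h | ⟨b, hb, heq⟩
  · left; exact h
  · right
    rw [List.mem_range'_1] at hb
    have hmin := pvMinA_le cs b b le_rfl rfl
    exact ⟨pvMinA cs b, b, hmin.1, by omega, hmin.2, heq⟩

theorem pvHasB_iff (cs : List Char) (i : Nat) (hi : i ≤ cs.length) :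
    pvHasB cs i = true ↔ ∃ a : Nat, a + i ≤ cs.length ∧ pvPre cs (a + i) = pvPre cs a := by
  unfold pvHasB
  rw [List.any_eq_true]
  constructor
  · rintro ⟨a, ha, hba⟩
    rw [List.mem_range] at ha
    exact ⟨a, by omega, by simpa [pvBalAt] using hba⟩
  · rintro ⟨a, ha, hba⟩
    exact ⟨a, List.mem_range.mpr (by omega), by simpa [pvBalAt] using hba⟩

theorem pvA_ub (cs : List Char) (a i : Nat) (hi : i < cs.length) (hai : a + i ≤ cs.length)
    (hp : pvPre cs (a + i) = pvPre cs a) : (i : Int) ≤ pvRefA cs := by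
  unfold pvRefA
  exact (pvCondmax_spec (List.range cs.length) (fun i => pvHasB cs i) (fun i => (i : Int)) 0).2.2
    i (List.mem_range.mpr hi) ((pvHasB_iff cs i (by omega)).mpr ⟨a, hai, hp⟩)

theorem pvA_nonneg (cs : List Char) : 0 ≤ pvRefA cs :=
  (pvCondmax_spec (List.range cs.length) (fun i => pvHasB cs i) (fun i => (i : Int)) 0).2.1

theorem pvA_att (cs : List Char) :
    pvRefA cs = 0 ∨ ∃ i : Nat, i < cs.length ∧ pvRefA cs = (i : Int) ∧
      ∃ a : Nat, a + i ≤ cs.length ∧ pvPre cs (a + i) = pvPre cs a := by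
  rcases (pvCondmax_spec (List.range cs.length) (fun i => pvHasB cs i) (fun i => (i : Int)) 0).1
    with h | ⟨i, hi, hpi, heq⟩
  · left; exact h
  · right
    rw [List.mem_range] at hi
    exact ⟨i, hi, heq, (pvHasB_iff cs i (by omega)).mp hpi⟩

theorem pvMain (cs : List Char)
    (hnd : ¬(cs ≠ [] ∧ 2 * cs.countP (fun c => c.isDigit) = cs.length)) :
    pvRefA cs = pvBfold cs cs.length := by
  rcases List.eq_nil_or_concat cs with rfl | hne'
  · rfl
  · have hcsne : cs ≠ [] := by rcases hne' with ⟨l, x, rfl⟩; simp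
    have hfull : pvPre cs cs.length ≠ 0 := by
      intro h
      exact hnd ⟨hcsne, (pvPre_full_iff cs).mp h⟩
    have hn1 : 1 ≤ cs.length := by
      cases cs with
      | nil => exact absurd rfl hcsne
      | cons y ys => simp
    apply le_antisymm
    · rcases pvA_att cs with h | ⟨i, hi, heq, a, hai, hp⟩
      · rw [h]; exact pvBfold_nonneg cs cs.length
      · rw [heq]
        have := pvB_ub cs a (a + i) (by omega) hai hp.symm
        push_cast at this ⊢
        omega
    · rcases pvB_att cs with h | ⟨a, b, hab, hb, hp, heq⟩
      · rw [h]; exact pvA_nonneg cs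
      · rw [heq]
        have hilt : b - a < cs.length := by
          by_contra hge
          have ha0 : a = 0 := by omega
          have hbn : b = cs.length := by omega
          subst ha0 hbn
          exact hfull (by rw [← hp]; rfl)
        have := pvA_ub cs a (b - a) hilt (by omega) (by rw [show a + (b - a) = b by omega]; exact hp.symm)
        push_cast at this ⊢
        omega

theorem pvTight (cs : List Char)
    (hd : cs ≠ [] ∧ 2 * cs.countP (fun c => c.isDigit) = cs.length) :
    pvRefA cs ≠ pvBfold cs cs.length := by
  have hn1 : 1 ≤ cs.length := by
    cases cs with
    | nil => exact absurd rfl hd.1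
    | cons y ys => simp
  have hfull : pvPre cs cs.length = 0 := (pvPre_full_iff cs).mpr hd.2
  have hBge : (cs.length : Int) ≤ pvBfold cs cs.length := by
    have := pvB_ub cs 0 cs.length (by omega) le_rfl (by rw [hfull]; rfl)
    omega
  have hAlt : pvRefA cs < (cs.length : Int) := by
    rcases pvA_att cs with h | ⟨i, hi, heq, _⟩
    · rw [h]; exact_mod_cast hn1
    · rw [heq]; exact_mod_cast hi
  omega

-- ===== VERDICT (by name: the statement is the Claim_ definition above) =====
theorem letters_numbers_brute_force_spec : Claim_unchanged_letters_numbers_brute_force := by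
  intro array _hdom
  unfold Spec_letters_numbers_brute_force
  intro hnd
  rw [pvPortA_eq, pvPortB_eq]
  exact pvMain array.toList (by unfold D_letters_numbers_brute_force at hnd; exact hnd)

theorem letters_numbers_brute_force_changed : Claim_changed_letters_numbers_brute_force := by
  unfold Claim_changed_letters_numbers_brute_force; decide

theorem letters_numbers_brute_force_tight : Claim_exact_letters_numbers_brute_force := by
  intro array _hdom hd
  rw [pvPortA_eq, pvPortB_eq]
  exact pvTight array.toList (by unfold D_letters_numbers_brute_force at hd; exact hd)
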